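-- pv_equiv track=rewrite | github.com/MRprgmr/SControl | SControl.py | enycrypt
-- ===== SOURCE A (Python) =====
-- import math
--
-- def on_to_2(num, n):
--     satr = ""
--     while num != 0:
--         satr = str(num % 2) + satr
--         num = (num // 2)
--     while len(satr) < n:
--         satr = '0' + satr
--     return satr
--
-- def enycrypt(matn):
--     p = 241
--     g = 51
--     x = 98
--     k = 12
--     b01 = ""
--     for c in matn:
--         b01 += str(on_to_2(ord(c), 8))
--
--     int(math.log(p, 2))
--     while len(b01) % (int(math.log(p, 2))) != 0:
--         b01 = '0' + b01
--
--     y = (g ** x) % p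
--     a = (g ** k) % p
--     shifr = chr(a)
--     for i in range(0, len(b01), 7):
--         b_i_son = int(b01[i:i + 7], 2)
--         natija = (y ** k * b_i_son) % p
--         shifr += chr(natija)
--     return shifr
-- ===== SOURCE B (Python) =====
-- def enycrypt(matn):
--     p = 241
--     g = 51
--     x = 98
--     k = 12
--     V = 0
--     L = 0
--     for c in matn:
--         w = max(8, ord(c).bit_length())
--         V = V * 2 ** w + ord(c)
--         L += w
--     nchunks = (L + 6) // 7
--     chunks = []
--     for _ in range(nchunks):
--         chunks.append(V % 128)
--         V //= 128
--     yk = pow(g, x, p) ** k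
--     out = [chr(pow(g, k, p))]
--     for c in reversed(chunks):
--         out.append(chr(yk * c % p))
--     return ''.join(out)
-- ===== Notes on version B (the rewrite author's own statement) =====
-- stated objective: alternative
-- what changed: B replaces the concatenated binary-digit string, its left-pad-to-multiple-of-7 loop and the 7-character slice parsing by one big-integer accumulator plus a bit-length counter, peeling the 7-bit chunks off arithmetically with mod and floor division.
import Mathlib
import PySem

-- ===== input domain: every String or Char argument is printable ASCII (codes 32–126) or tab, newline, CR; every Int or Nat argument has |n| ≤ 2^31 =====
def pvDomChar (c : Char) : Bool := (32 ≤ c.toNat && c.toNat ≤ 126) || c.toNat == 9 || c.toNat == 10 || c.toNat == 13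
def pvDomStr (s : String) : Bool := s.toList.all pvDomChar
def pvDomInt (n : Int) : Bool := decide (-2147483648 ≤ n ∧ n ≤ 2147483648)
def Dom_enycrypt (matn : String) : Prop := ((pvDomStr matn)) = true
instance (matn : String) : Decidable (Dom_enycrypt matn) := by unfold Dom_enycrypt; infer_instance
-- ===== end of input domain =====

-- B replaces A's concatenated '0'/'1' bit-string, its left-pad-to-multiple-of-7 loop and the
-- 7-character slice parsing by one big-integer accumulator with arithmetic 7-bit chunk
-- extraction (objective: alternative).

-- ===== PORT A =====
-- first while loop of on_to_2: binary digits of num, most significant last appended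
-- (ord(c) is a Nat here, so Python's // and % on it coincide with Nat division)
def onTo2Bits (num : Nat) : List Char :=
  if h : num = 0 then []
  else onTo2Bits (num / 2) ++ [if num % 2 = 1 then '1' else '0']
decreasing_by exact Nat.div_lt_self (Nat.pos_of_ne_zero h) (by omega)

-- second while loop of on_to_2: prepend '0' until length n
def padTo (n : Nat) (s : List Char) : List Char :=
  if s.length < n then padTo n ('0' :: s) else s
termination_by n - s.length

def on_to_2 (num n : Nat) : List Char := padTo n (onTo2Bits num)

-- int(s, 2): exact for strings of '0'/'1' digits, the only strings it is applied to here
def parseBin (s : List Char) : Nat :=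
  s.foldl (fun a c => a * 2 + (if c = '1' then 1 else 0)) 0

-- while len(b01) % 7 != 0: b01 = '0' + b01   (int(math.log(241, 2)) = 7, a constant)
def padMod7 (s : List Char) : List Char :=
  if h : s.length % 7 ≠ 0 then padMod7 ('0' :: s) else s
termination_by (7 - s.length % 7) % 7
decreasing_by simp only [List.length_cons]; omega

def enycrypt (matn : String) : String :=
  let p := 241
  let g := 51
  let x := 98
  let k := 12
  let b01 := matn.toList.foldl (fun acc c => acc ++ on_to_2 c.toNat 8) []
  let b01 := padMod7 b01
  let y := g ^ x % p
  let a := g ^ k % p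
  let shifr := [Char.ofNat a]
  let shifr := (PySem.List.pyRange 0 (b01.length : Int) 7).foldl (fun acc i =>
      let b_i_son := parseBin (PySem.List.slice b01 (some i) (some (i + 7)))
      let natija := (y ^ k * b_i_son) % p
      acc ++ [Char.ofNat natija]) shifr
  String.mk shifr

-- ===== PORT B =====
def enycrypt_alt (matn : String) : String :=
  let p := 241
  let g := 51
  let x := 98
  let k := 12
  let vl := matn.toList.foldl (fun (vl : Nat × Nat) c =>
      let w := max 8 (Nat.size c.toNat)   -- ord(c).bit_length()
      (vl.1 * 2 ^ w + c.toNat, vl.2 + w)) (0, 0)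
  let nchunks := (vl.2 + 6) / 7
  let vc := (List.range nchunks).foldl (fun (vc : Nat × List Nat) _ =>
      (vc.1 / 128, vc.2 ++ [vc.1 % 128])) (vl.1, [])
  let yk := (g ^ x % p) ^ k               -- pow(g, x, p) ** k
  let out := [Char.ofNat (g ^ k % p)]
  let out := vc.2.reverse.foldl (fun acc c =>
      acc ++ [Char.ofNat (yk * c % p)]) out
  String.mk out

-- ===== PRECONDITION & SPEC =====
def Spec_enycrypt (matn : String) (out : String) : Prop := out = enycrypt_alt matn
instance (matn : String) (out : String) : Decidable (Spec_enycrypt matn out) := by unfold Spec_enycrypt; infer_instance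

-- ===== CLAIM (what is proved, stated in full; the proofs are below) =====
def Claim_equal_enycrypt : Prop := ∀ (matn : String), Dom_enycrypt matn → Spec_enycrypt matn (enycrypt matn)

-- ===== LEMMAS AND PROOFS =====

theorem parseBin_foldl (v : List Char) (a : Nat) :
    v.foldl (fun a c => a * 2 + (if c = '1' then 1 else 0)) a
      = a * 2 ^ v.length + parseBin v := by
  induction v generalizing a with
  | nil => simp [parseBin]
  | cons c t ih =>
    simp only [List.foldl_cons, List.length_cons, parseBin]
    rw [ih, ih (0 * 2 + _)]
    ring

theorem parseBin_append (u v : List Char) :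
    parseBin (u ++ v) = parseBin u * 2 ^ v.length + parseBin v := by
  unfold parseBin
  rw [List.foldl_append, parseBin_foldl]
  rfl

theorem parseBin_lt (s : List Char) : parseBin s < 2 ^ s.length := by
  induction s with
  | nil => simp [parseBin]
  | cons c t ih =>
    have := parseBin_append [c] t
    simp only [List.singleton_append] at this
    rw [this]
    have hc : parseBin [c] ≤ 1 := by unfold parseBin; simp; split <;> omega
    simp only [List.length_cons, pow_succ]
    nlinarith

theorem parseBin_replicate_zero (r : Nat) : parseBin (List.replicate r '0') = 0 := by
  induction r with
  | zero => simp [parseBin]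
  | succ n ih => rw [List.replicate_succ', parseBin_append, ih]; simp [parseBin]

theorem onTo2Bits_parse (m : Nat) : parseBin (onTo2Bits m) = m := by
  induction m using Nat.strong_induction_on with
  | _ m ih =>
    rw [onTo2Bits]
    split
    · simp [parseBin]; omega
    · rename_i h
      rw [parseBin_append, ih (m / 2) (Nat.div_lt_self (Nat.pos_of_ne_zero h) (by omega))]
      have : parseBin [if m % 2 = 1 then '1' else '0'] = m % 2 := by
        split <;> simp [parseBin] <;> omega
      simp only [List.length_singleton, this]
      omega

theorem size_div2 (m : Nat) (h : m ≠ 0) : Nat.size m = Nat.size (m / 2) + 1 := by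
  apply Nat.le_antisymm
  · rw [Nat.size_le, pow_succ]
    have := Nat.lt_size_self (m / 2)
    omega
  · by_cases h2 : m / 2 = 0
    · rw [h2]
      have : 0 < Nat.size m := Nat.size_pos.mpr (Nat.pos_of_ne_zero h)
      simp [Nat.size_zero]; omega
    · have hs : 0 < Nat.size (m / 2) := Nat.size_pos.mpr (Nat.pos_of_ne_zero h2)
      have h1 : 2 ^ (Nat.size (m / 2) - 1) ≤ m / 2 := Nat.lt_size.mp (by omega)
      have h3 : Nat.size (m / 2) < Nat.size m := by
        rw [Nat.lt_size]
        have : 2 ^ Nat.size (m / 2) = 2 * 2 ^ (Nat.size (m / 2) - 1) := by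
          rw [← pow_succ']
          congr 1
          omega
        omega
      omega

theorem onTo2Bits_length (m : Nat) : (onTo2Bits m).length = Nat.size m := by
  induction m using Nat.strong_induction_on with
  | _ m ih =>
    rw [onTo2Bits]
    split
    · simp [*, Nat.size_zero]
    · rename_i h
      rw [List.length_append, ih (m / 2) (Nat.div_lt_self (Nat.pos_of_ne_zero h) (by omega))]
      simp only [List.length_singleton]
      exact (size_div2 m h).symm

theorem padTo_eq (n : Nat) (s : List Char) :
    padTo n s = List.replicate (n - s.length) '0' ++ s := by
  fun_induction padTo with
  | case1 s hlt ih =>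
      rw [ih]
      have : n - s.length = (n - ('0'::s).length) + 1 := by simp at *; omega
      rw [this, List.replicate_succ']
      simp
  | case2 s hlt => simp at hlt; simp [Nat.sub_eq_zero_of_le hlt]

theorem padMod7_eq (s : List Char) :
    padMod7 s = List.replicate ((7 - s.length % 7) % 7) '0' ++ s := by
  fun_induction padMod7 with
  | case1 s h ih =>
      rw [ih]
      have h2 : (7 - ('0'::s).length % 7) % 7 + 1 = (7 - s.length % 7) % 7 := by
        simp only [List.length_cons]; omega
      rw [← h2, List.replicate_succ']
      simp
  | case2 s h => simp at h; simp [h]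

theorem on_to_2_parse (m n : Nat) : parseBin (on_to_2 m n) = m := by
  unfold on_to_2
  rw [padTo_eq, parseBin_append, parseBin_replicate_zero, onTo2Bits_parse]
  simp

theorem on_to_2_length (m : Nat) (h : m < 256) : (on_to_2 m 8).length = 8 := by
  unfold on_to_2
  rw [padTo_eq, List.length_append, List.length_replicate, onTo2Bits_length]
  have : Nat.size m ≤ 8 := Nat.size_le.mpr (by norm_num; omega)
  omega

theorem fold_b01 (cs : List Char) (h : ∀ c ∈ cs, c.toNat < 256) (acc : List Char) :
    parseBin (cs.foldl (fun a c => a ++ on_to_2 c.toNat 8) acc)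
        = (cs.foldl (fun (vl : Nat × Nat) c =>
            (vl.1 * 2 ^ (max 8 (Nat.size c.toNat)) + c.toNat, vl.2 + max 8 (Nat.size c.toNat)))
            (parseBin acc, acc.length)).1
    ∧ (cs.foldl (fun a c => a ++ on_to_2 c.toNat 8) acc).length
        = (cs.foldl (fun (vl : Nat × Nat) c =>
            (vl.1 * 2 ^ (max 8 (Nat.size c.toNat)) + c.toNat, vl.2 + max 8 (Nat.size c.toNat)))
            (parseBin acc, acc.length)).2 := by
  induction cs generalizing acc with
  | nil => simp
  | cons c t ih =>
    have hc : c.toNat < 256 := h c (by simp)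
    have hw : max 8 (Nat.size c.toNat) = 8 :=
      max_eq_left (Nat.size_le.mpr (by norm_num; omega))
    have hstep : parseBin (acc ++ on_to_2 c.toNat 8) = parseBin acc * 2 ^ 8 + c.toNat := by
      rw [parseBin_append, on_to_2_parse, on_to_2_length c.toNat hc]
    have hlen : (acc ++ on_to_2 c.toNat 8).length = acc.length + 8 := by
      rw [List.length_append, on_to_2_length c.toNat hc]
    simp only [List.foldl_cons, hw]
    have := ih (fun c hc => h c (by simp [hc])) (acc ++ on_to_2 c.toNat 8)
    rw [hstep, hlen] at this
    exact this

theorem chunk_extract : ∀ (m : Nat) (s : List Char), s.length = 7 * m → ∀ j < m,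
    parseBin s / 128 ^ j % 128 = parseBin ((s.drop (7 * (m - 1 - j))).take 7) := by
  intro m
  induction m with
  | zero => intro s _ j hj; omega
  | succ m ih =>
    intro s hs j hj
    have hsplit : s = s.take 7 ++ s.drop 7 := (List.take_append_drop 7 s).symm
    have hlt : (s.take 7).length = 7 := by simp; omega
    have hlu : (s.drop 7).length = 7 * m := by simp; omega
    have hparse : parseBin s = parseBin (s.take 7) * 128 ^ m + parseBin (s.drop 7) := by
      conv_lhs => rw [hsplit]
      rw [parseBin_append, hlu]
      norm_num [pow_mul]
    have hU : parseBin (s.drop 7) < 128 ^ m := by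
      have := parseBin_lt (s.drop 7)
      rwa [hlu, pow_mul] at this
    have hT : parseBin (s.take 7) < 128 := by
      have := parseBin_lt (s.take 7)
      rwa [hlt] at this
    by_cases hjm : j = m
    · subst hjm
      have hd : parseBin s / 128 ^ j = parseBin (s.take 7) := by
        rw [hparse, add_comm, Nat.add_mul_div_right _ _ (by positivity), Nat.div_eq_of_lt hU]
        omega
      rw [hd, Nat.mod_eq_of_lt hT]
      have : j + 1 - 1 - j = 0 := by omega
      rw [this]
      simp
    · have hjm' : j < m := by omega
      have key : parseBin s / 128 ^ j % 128 = parseBin (s.drop 7) / 128 ^ j % 128 := by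
        have hmj : 128 ^ m = 128 ^ (m - j - 1) * 128 * 128 ^ j := by
          rw [mul_assoc, ← pow_succ', ← pow_add]
          congr 1
          omega
        rw [hparse, hmj, ← mul_assoc, add_comm,
            Nat.add_mul_div_right _ _ (by positivity : (0:Nat) < 128 ^ j),
            ← mul_assoc, Nat.add_mul_mod_self_right]
      rw [key, ih (s.drop 7) hlu j hjm']
      have h1 : 7 * (m + 1 - 1 - j) = 7 + 7 * (m - 1 - j) := by omega
      rw [h1, ← List.drop_drop]

theorem foldl_app_map {α β : Type} (l : List α) (f : α → β) (init : List β) :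
    l.foldl (fun acc x => acc ++ [f x]) init = init ++ l.map f := by
  induction l generalizing init with
  | nil => simp
  | cons c t ih => simp [ih]

theorem pyRangeA (m : Nat) :
    PySem.List.pyRange 0 ((7 * m : Nat) : Int) 7
      = (List.range m).map (fun i => ((7 * i : Nat) : Int)) := by
  rw [PySem.List.pyRange_of_pos 0 _ (by norm_num)]
  have : (if (0:Int) < ((7 * m : Nat) : Int) then ((((7 * m : Nat) : Int) - 0 + 7 - 1) / 7).toNat else 0) = m := by
    split
    · rename_i h
      push_cast
      rw [show ((7:Int) * m - 0 + 7 - 1) = (7 * m + 6 : Int) by ring]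
      omega
    · rename_i h
      push_cast at h
      omega
  rw [this]
  apply List.map_congr_left
  intro k _
  push_cast
  ring

theorem peel_eq (n V : Nat) (cs : List Nat) :
    (List.range n).foldl (fun (vc : Nat × List Nat) _ =>
        (vc.1 / 128, vc.2 ++ [vc.1 % 128])) (V, cs)
      = (V / 128 ^ n, cs ++ (List.range n).map (fun i => V / 128 ^ i % 128)) := by
  induction n with
  | zero => simp
  | succ n ih =>
    rw [List.range_succ, List.foldl_append, ih]
    simp only [List.foldl_cons, List.foldl_nil, List.map_append, List.map_cons, List.map_nil]
    rw [Nat.div_div_eq_div_mul, ← pow_succ]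
    simp
theorem reverse_range_map {β : Type} (m : Nat) (g : Nat → β) :
    ((List.range m).map g).reverse = (List.range m).map (fun k => g (m - 1 - k)) := by
  induction m with
  | zero => simp
  | succ n ih =>
    conv_lhs => rw [List.range_succ]
    rw [List.map_append, List.reverse_append, ih]
    conv_rhs => rw [List.range_succ_eq_map]
    simp only [List.map_nil, List.reverse_cons, List.reverse_nil, List.nil_append,
      List.cons_append, List.map_cons, List.map_map]
    congr 1
    apply List.map_congr_left
    intro k _
    congr 1
    omega

-- ===== VERDICT (by name: the statement is the Claim_ definition above) =====
theorem enycrypt_spec : Claim_equal_enycrypt := by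
  intro matn hdom
  have hcs : ∀ c ∈ matn.toList, c.toNat < 256 := by
    intro c hc
    have h := List.all_eq_true.mp hdom c hc
    simp only [pvDomChar, Bool.or_eq_true, Bool.and_eq_true, decide_eq_true_eq, beq_iff_eq] at h
    omega
  have hfold := fold_b01 matn.toList hcs []
  simp only [List.length_nil, show parseBin [] = 0 from rfl] at hfold
  unfold Spec_enycrypt enycrypt enycrypt_alt
  simp only []
  set B0 := List.foldl (fun acc c => acc ++ on_to_2 c.toNat 8) [] matn.toList with hB0
  set VL := List.foldl (fun (vl : Nat × Nat) c =>
      (vl.1 * 2 ^ (max 8 (Nat.size c.toNat)) + c.toNat, vl.2 + max 8 (Nat.size c.toNat)))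
      (0, 0) matn.toList with hVL
  obtain ⟨hV, hL⟩ := hfold
  set m := (VL.2 + 6) / 7 with hm
  have hN : (padMod7 B0).length = 7 * m := by
    rw [padMod7_eq, List.length_append, List.length_replicate, hL]
    omega
  have hVp : parseBin (padMod7 B0) = VL.1 := by
    rw [padMod7_eq, parseBin_append, parseBin_replicate_zero, hV]
    simp
  congr 1
  rw [hN, pyRangeA, peel_eq, List.nil_append, reverse_range_map,
      foldl_app_map, foldl_app_map, List.map_map, List.map_map]
  congr 1
  apply List.map_congr_left
  intro k hk
  simp only [List.mem_range] at hk
  simp only [Function.comp]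
  rw [show ((7 * k : Nat) : Int) + 7 = ((7 * k : Nat) : Int) + ((7 : Nat) : Int) by norm_num]
  rw [PySem.List.slice_natCast_add, ← hVp]
  have hx := chunk_extract m (padMod7 B0) hN (m - 1 - k) (by omega)
  have hkk : m - 1 - (m - 1 - k) = k := by omega
  rw [hkk] at hx
  rw [hx]
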